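-- pv_equiv track=rewrite | github.com/joshanashakya/dissertation | workspace/dataset/java-python/GeeksForGeeks/4965/A/2.py | isKSortedArray
-- ===== SOURCE A (Python) =====
-- def binarySearch(arr, low, high, x):
--     while (low <= high):
--         mid = int((low + high) / 2)
--
--         if (arr[mid] == x):
--             return mid
--         elif(arr[mid] > x):
--             high = mid - 1
--         else:
--             low = mid + 1
--
-- def isKSortedArray(arr, n, k):
--
--     # auxiliary array 'aux'
--     aux = [0 for i in range(n)]
--
--     # copy elements of 'arr' to 'aux'
--     for i in range(0, n, 1):
--         aux[i] = arr[i]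
--
--     # sort 'aux'
--     aux.sort(reverse = False)
--
--     # for every element of 'arr' at
--     # index 'i', find its index 'j' in 'aux'
--     for i in range(0, n, 1):
--
--         # index of arr[i] in sorted
--         # array 'aux'
--         j = binarySearch(aux, 0, n - 1, arr[i])
--
--         # if abs(i-j) > k, then that element is
--         # not at-most k distance away from its
--         # target position. Thus, 'arr' is not a
--         # k sorted array
--         if (abs(i - j) > k):
--             return "No"
--
--     # 'arr' is a k sorted array
--     return "Yes"
-- ===== SOURCE B (Python) =====
-- def _search(aux, low, high, x):
--     if low > high:
--         return None
--     mid = (low + high) // 2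
--     if aux[mid] == x:
--         return mid
--     if aux[mid] > x:
--         return _search(aux, low, mid - 1, x)
--     return _search(aux, mid + 1, high, x)
--
--
-- def isKSortedArray(arr, n, k):
--     aux = sorted(arr[:n])
--     return "Yes" if all(abs(i - _search(aux, 0, n - 1, arr[i])) <= k
--                         for i in range(n)) else "No"
-- ===== Notes on version B (the rewrite author's own statement) =====
-- stated objective: alternative
-- what changed: The iterative while-loop binary search becomes a recursive divide-and-conquer helper with the identical descent (so duplicate tie-breaking matches), the allocate-zeros-then-copy loop becomes a slice passed to sorted(), and the early-return scan becomes a single all() over the indices.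
import Mathlib
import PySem

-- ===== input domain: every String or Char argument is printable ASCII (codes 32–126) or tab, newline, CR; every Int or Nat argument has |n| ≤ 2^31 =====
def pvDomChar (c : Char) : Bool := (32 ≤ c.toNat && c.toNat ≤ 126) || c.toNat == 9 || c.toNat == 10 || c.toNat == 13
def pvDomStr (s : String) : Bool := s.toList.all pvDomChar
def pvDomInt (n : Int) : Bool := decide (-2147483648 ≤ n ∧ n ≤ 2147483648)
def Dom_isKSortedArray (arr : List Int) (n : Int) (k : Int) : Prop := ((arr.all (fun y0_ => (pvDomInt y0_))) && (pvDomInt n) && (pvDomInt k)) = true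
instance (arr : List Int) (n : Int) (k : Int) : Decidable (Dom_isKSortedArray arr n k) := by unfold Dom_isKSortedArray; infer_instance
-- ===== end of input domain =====

-- B replaces the iterative while-loop binary search by a recursive one with the identical
-- descent, builds the sorted auxiliary list from a slice instead of an allocate-and-copy
-- loop, and replaces the early-return scan by a single all() over the indices (objective:
-- alternative; same asymptotic cost).

-- midpoint bounds for A's int((low+high)/2) (= truncating division); cited by decreasing_by
theorem pvTruncMidBounds (lo hi : Int) (h : lo ≤ hi) :
    lo ≤ PySem.Int.truncdiv (lo + hi) 2 ∧ PySem.Int.truncdiv (lo + hi) 2 ≤ hi := by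
  show lo ≤ (lo+hi).tdiv 2 ∧ (lo+hi).tdiv 2 ≤ hi
  by_cases h0 : 0 ≤ lo + hi
  · rw [Int.tdiv_eq_ediv_of_nonneg h0]; omega
  · have he : (lo+hi).tdiv 2 = -((-(lo+hi)).tdiv 2) := by
      rw [← Int.neg_tdiv]; ring_nf
    rw [he, Int.tdiv_eq_ediv_of_nonneg (by omega : (0:Int) ≤ -(lo+hi))]; omega

-- ===== PORT A =====
-- while-loop of binarySearch, transliterated as recursion on the mutated (low, high) state
def binarySearchA (aux : List Int) (low high x : Int) : Option Int :=
  if h : low ≤ high then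
    let mid := PySem.Int.truncdiv (low + high) 2      -- int((low + high) / 2): truncating
    match PySem.List.pyGet? aux mid with
    | none => none      -- IndexError in Python; unreachable from A's call (0 ≤ low, high < len aux)
    | some v =>
      if v = x then some mid
      else if v > x then binarySearchA aux low (mid - 1) x
      else binarySearchA aux (mid + 1) high x
  else none             -- loop falls through: Python returns None
termination_by (high + 1 - low).toNat
decreasing_by
  · have := pvTruncMidBounds low high h; omega
  · have := pvTruncMidBounds low high h; omega

-- the 'for i in range(0, n, 1)' loop with its early 'return "No"'
def kLoopA (arr aux : List Int) (n k : Int) : List Int → String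
  | [] => "Yes"
  | i :: rest =>
    match binarySearchA aux 0 (n - 1) (PySem.List.pyGetD arr i 0) with
    | none => "No"      -- Python: TypeError on abs(i - None); unreachable under Pre_
    | some j => if |i - j| > k then "No" else kLoopA arr aux n k rest

def isKSortedArray (arr : List Int) (n : Int) (k : Int) : String :=
  let aux0 : List Int := (PySem.List.pyRange 0 n 1).map (fun _ => 0)   -- [0 for i in range(n)]
  -- for i in range(0, n, 1): aux[i] = arr[i]
  let aux1 := (PySem.List.pyRange 0 n 1).foldl
    (fun aux i => PySem.List.pySetD aux i (PySem.List.pyGetD arr i 0)) aux0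
  let aux := PySem.List.sorted aux1 (fun x => x) false                  -- aux.sort()
  kLoopA arr aux n k (PySem.List.pyRange 0 n 1)

-- ===== PORT B =====
-- recursive divide-and-conquer search (_search in Source B), identical descent
def searchAlt (aux : List Int) (low high x : Int) : Option Int :=
  if h : low > high then none
  else
    let mid := PySem.Int.floordiv (low + high) 2
    match PySem.List.pyGet? aux mid with
    | none => none      -- IndexError in Python; unreachable from B's call
    | some v =>
      if v = x then some mid
      else if v > x then searchAlt aux low (mid - 1) x
      else searchAlt aux (mid + 1) high x
termination_by (high + 1 - low).toNat
decreasing_by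
  · have := PySem.Int.floordiv_two_mid_bounds (le_of_not_gt h); omega
  · have := PySem.Int.floordiv_two_mid_bounds (le_of_not_gt h); omega

def isKSortedArray_alt (arr : List Int) (n : Int) (k : Int) : String :=
  let aux := PySem.List.sorted (PySem.List.slice arr none (some n)) (fun x => x) false  -- sorted(arr[:n])
  if (PySem.List.pyRange 0 n 1).all (fun i =>
      match searchAlt aux 0 (n - 1) (PySem.List.pyGetD arr i 0) with
      | none => false   -- Python: TypeError on abs(i - None); unreachable under Pre_
      | some j => |i - j| ≤ k)
  then "Yes" else "No"

-- ===== PRECONDITION & SPEC =====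
-- Pre_ excludes only n > len(arr), where A's copy loop raises IndexError
def Pre_isKSortedArray (arr : List Int) (n : Int) (k : Int) : Prop := n ≤ (arr.length : Int)
instance (arr : List Int) (n : Int) (k : Int) : Decidable (Pre_isKSortedArray arr n k) := by
  unfold Pre_isKSortedArray; infer_instance

def pvWitness_isKSortedArray : List Int × Int × Int := ([2, 1, 3, 3], 4, 1)

def Spec_isKSortedArray (arr : List Int) (n : Int) (k : Int) (out : String) : Prop := out = isKSortedArray_alt arr n k
instance (arr : List Int) (n : Int) (k : Int) (out : String) : Decidable (Spec_isKSortedArray arr n k out) := by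
  unfold Spec_isKSortedArray; infer_instance

-- ===== CLAIM =====
def Claim_equal_isKSortedArray : Prop := ∀ (arr : List Int) (n : Int) (k : Int), Dom_isKSortedArray arr n k → Pre_isKSortedArray arr n k → Spec_isKSortedArray arr n k (isKSortedArray arr n k)

-- ===== LEMMAS AND PROOFS =====

-- the two searches coincide for a nonnegative lower bound (the only way they are called)
theorem search_eq (aux : List Int) (x : Int) :
    ∀ (fuel : Nat) (low high : Int), (high + 1 - low).toNat ≤ fuel → 0 ≤ low →
      binarySearchA aux low high x = searchAlt aux low high x := by
  intro fuel
  induction fuel with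
  | zero =>
    intro low high hf h0
    rw [binarySearchA, searchAlt]
    rw [dif_neg (by omega : ¬ low ≤ high), dif_pos (by omega : low > high)]
  | succ m ih =>
    intro low high hf h0
    by_cases hlh : low ≤ high
    · rw [binarySearchA, searchAlt, dif_pos hlh, dif_neg (by omega : ¬ low > high)]
      have hmid : PySem.Int.truncdiv (low + high) 2 = PySem.Int.floordiv (low + high) 2 := by
        show (low + high).tdiv 2 = _
        rw [PySem.Int.floordiv_eq_ediv_of_pos (by omega), Int.tdiv_eq_ediv_of_nonneg (by omega)]
      rw [hmid]
      have hb := PySem.Int.floordiv_two_mid_bounds (lo := low) (hi := high) hlh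
      set mid := PySem.Int.floordiv (low + high) 2 with hm
      cases hg : PySem.List.pyGet? aux mid with
      | none => simp only [hg]
      | some v =>
        simp only [hg]
        by_cases hvx : v = x
        · simp [hvx]
        · simp only [if_neg hvx]
          by_cases hgt : v > x
          · simp only [if_pos hgt]
            exact ih low (mid - 1) (by omega) h0
          · simp only [if_neg hgt]
            exact ih (mid + 1) high (by omega) (by omega)
    · rw [binarySearchA, searchAlt, dif_neg hlh, dif_pos (by omega : low > high)]

-- A's allocate-zeros-then-copy construction is the prefix of arr
theorem build_eq (arr : List Int) (init : List Int) :
    ∀ (m : Nat), m ≤ arr.length → m ≤ init.length →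
      (PySem.List.pyRange 0 (m : Int) 1).foldl
        (fun aux i => PySem.List.pySetD aux i (PySem.List.pyGetD arr i 0)) init
      = arr.take m ++ init.drop m := by
  intro m
  induction m with
  | zero => intro _ _; simp [PySem.List.pyRange_one_eq_nil]
  | succ m ih =>
    intro hm hi
    have hr : PySem.List.pyRange 0 ((m+1 : Nat) : Int) 1
        = PySem.List.pyRange 0 (m : Int) 1 ++ [(m : Int)] := by
      push_cast
      exact PySem.List.pyRange_one_succ_right (by positivity)
    rw [hr, List.foldl_append, ih (by omega) (by omega)]
    simp only [List.foldl]
    rw [PySem.List.pySetD_natCast]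
    rw [PySem.List.pyGetD_natCast]
    have hlt : m < arr.length := by omega
    have hti : m < init.length := by omega
    have htk : (arr.take m).length = m := by simp; omega
    rw [List.set_append_right _ _ (by omega)]
    rw [htk, Nat.sub_self]
    rw [List.drop_eq_getElem_cons hti]
    simp only [List.set_cons_zero]
    simp only [List.getD, List.getElem?_eq_getElem hlt, Option.getD_some]
    rw [List.take_succ_eq_append_getElem hlt, List.append_assoc]
    rfl

-- A's early-return scan is B's all()
theorem loop_all (arr aux : List Int) (n k : Int) :
    ∀ (idxs : List Int), kLoopA arr aux n k idxs =
      if idxs.all (fun i =>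
          match searchAlt aux 0 (n - 1) (PySem.List.pyGetD arr i 0) with
          | none => false
          | some j => |i - j| ≤ k)
      then "Yes" else "No" := by
  intro idxs
  induction idxs with
  | nil => simp [kLoopA]
  | cons i rest ih =>
    rw [kLoopA]
    rw [search_eq aux (PySem.List.pyGetD arr i 0) (n - 1 + 1 - 0).toNat 0 (n - 1) le_rfl le_rfl]
    cases hs : searchAlt aux 0 (n - 1) (PySem.List.pyGetD arr i 0) with
    | none => simp [hs]
    | some j =>
      by_cases hk : |i - j| > k
      · simp [hs, hk]
      · simp only [hs, if_neg hk, ih, List.all_cons]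
        have : (|i - j| ≤ k) = True := by simp; omega
        simp [this]

-- ===== VERDICT =====
theorem isKSortedArray_spec : Claim_equal_isKSortedArray := by
  intro arr n k hdom hpre
  unfold Spec_isKSortedArray isKSortedArray isKSortedArray_alt
  by_cases hn : n ≤ 0
  · rw [PySem.List.pyRange_one_eq_nil hn]
    simp [kLoopA]
  · have hlen : n.toNat ≤ arr.length := by
      unfold Pre_isKSortedArray at hpre; omega
    have hcast : ((n.toNat : Nat) : Int) = n := by omega
    have hinit_len : ((PySem.List.pyRange 0 n 1).map (fun _ => (0:Int))).length = n.toNat := by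
      simp [PySem.List.length_pyRange_one]
    have hbuild := build_eq arr ((PySem.List.pyRange 0 n 1).map (fun _ => (0:Int)))
      n.toNat hlen (by omega)
    rw [hcast] at hbuild
    have hdrop : ((PySem.List.pyRange 0 n 1).map (fun _ => (0:Int))).drop n.toNat = [] := by
      rw [List.drop_of_length_le (by omega)]
    rw [hdrop, List.append_nil] at hbuild
    have hslice : PySem.List.slice arr none (some n) = arr.take n.toNat :=
      PySem.List.slice_to arr (by omega)
    simp only [hbuild, hslice]
    rw [loop_all]
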